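-- pv_equiv track=rewrite | github.com/heryuman/OLC2_2SEVD25_Proyecto2_5grupo | Back/app/services/model_service.py | inferir_aspecto
-- ===== SOURCE A (Python) =====
-- def inferir_aspecto(palabras_tema, aspectos):
--     scores = {aspecto: 0 for aspecto in aspectos}
--
--     for palabra in palabras_tema:
--         for aspecto, keywords in aspectos.items():
--             if any(k in palabra for k in keywords):
--                 scores[aspecto] += 1
--
--     # elegir el aspecto más representativo
--     aspecto_principal = max(scores, key=scores.get)
--
--     # si no hay coincidencias claras
--     if scores[aspecto_principal] == 0:
--         return "aspecto general no definido"
--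
--     return aspecto_principal
-- ===== SOURCE B (Python) =====
-- def inferir_aspecto(palabras_tema, aspectos):
--     # Index every keyword by the aspects it belongs to, then score each word by
--     # enumerating its substrings and looking them up in that index: the
--     # per-word scan over all keywords of every aspect disappears.
--     indice = {}
--     for aspecto, keywords in aspectos.items():
--         for k in keywords:
--             indice.setdefault(k, set()).add(aspecto)
--
--     cuenta = {aspecto: 0 for aspecto in aspectos}
--     for palabra in palabras_tema:
--         n = len(palabra)
--         encontrados = set()
--         for i in range(n + 1):
--             for j in range(i, n + 1):
--                 sub = palabra[i:j]
--                 if sub in indice: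
--                     encontrados |= indice[sub]
--         for a in encontrados:
--             cuenta[a] += 1
--
--     mejor, puntaje = max(cuenta.items(), key=lambda kv: kv[1])
--     if puntaje == 0:
--         return "aspecto general no definido"
--     return mejor
-- ===== Notes on version B (the rewrite author's own statement) =====
-- stated objective: alternative
-- what changed: B replaces A's per-word scan over every aspect's keyword list (substring test per keyword) by dictionary matching: it builds a keyword-to-aspects hash index once, then for each word enumerates its substrings, looks each up in the index and unions the matched aspect sets, bumping each matched aspect's count once per word.
import Mathlib
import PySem

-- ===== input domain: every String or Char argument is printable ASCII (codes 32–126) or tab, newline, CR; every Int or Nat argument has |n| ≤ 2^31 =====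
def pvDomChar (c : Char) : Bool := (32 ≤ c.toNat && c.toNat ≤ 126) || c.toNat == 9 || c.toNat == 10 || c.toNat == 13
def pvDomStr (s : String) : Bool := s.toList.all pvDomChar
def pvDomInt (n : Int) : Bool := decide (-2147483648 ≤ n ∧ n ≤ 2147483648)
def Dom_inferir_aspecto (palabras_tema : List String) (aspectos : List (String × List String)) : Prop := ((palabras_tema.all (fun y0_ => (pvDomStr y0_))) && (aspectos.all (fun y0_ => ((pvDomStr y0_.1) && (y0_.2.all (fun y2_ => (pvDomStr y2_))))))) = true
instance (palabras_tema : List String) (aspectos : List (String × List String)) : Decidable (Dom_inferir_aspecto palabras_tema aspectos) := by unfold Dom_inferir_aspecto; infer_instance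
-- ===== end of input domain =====

-- B replaces A's per-word scan over every aspect's keyword list by a keyword->aspects
-- index probed with each word's substrings (objective: alternative); return values proved equal.


-- ===== PORT A =====
-- 'any(k in palabra for k in keywords)'
def pvAnyKw (keywords : List String) (palabra : String) : Bool :=
  keywords.any (fun k => PySem.Str.isIn k palabra)

-- one step of a first-max selection over (key, score) pairs
-- (A: max(scores, key=scores.get); B: max(cuenta.items(), key=lambda kv: kv[1]))
def pvMaxStep (acc : Option (String × Int)) (p : String × Int) : Option (String × Int) :=
  match acc with
  | none => some p
  | some q => if p.2 > q.2 then some p else acc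

def inferir_aspecto (palabras_tema : List String) (aspectos : List (String × List String)) : String :=
  -- scores = {aspecto: 0 for aspecto in aspectos}
  let scores0 : PySem.Dict String Int :=
    aspectos.foldl (fun d p => d.insert p.1 0) PySem.Dict.empty
  -- the double loop: scores[aspecto] += 1 on each matching word
  let scores : PySem.Dict String Int :=
    palabras_tema.foldl (fun sc palabra =>
      aspectos.foldl (fun sc2 p =>
        if pvAnyKw p.2 palabra then sc2.insert p.1 (sc2.getD p.1 0 + 1) else sc2) sc) scores0
  -- aspecto_principal = max(scores, key=scores.get)
  match scores.items.foldl pvMaxStep none with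
  | none => ""   -- Python raises ValueError here (empty dict); excluded by Pre_
  | some (a, v) => if v == 0 then "aspecto general no definido" else a

-- ===== PORT B =====
-- indice: keyword -> set of aspects owning it (indice.setdefault(k, set()).add(aspecto))
def pvBuildIdx (aspectos : List (String × List String)) : PySem.Dict String (PySem.Set String) :=
  aspectos.foldl (fun d p =>
    p.2.foldl (fun d2 k => d2.insert k (PySem.Set.add (d2.getD k PySem.Set.empty) p.1)) d)
    PySem.Dict.empty

-- encontrados: union of the index entries of all substrings palabra[i:j]
def pvHits (idx : PySem.Dict String (PySem.Set String)) (palabra : String) : PySem.Set String :=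
  let n : Int := PySem.Str.len palabra
  (PySem.List.pyRange 0 (n + 1)).foldl (fun hit i =>
    (PySem.List.pyRange i (n + 1)).foldl (fun hit2 j =>
      let sub := PySem.Str.slice palabra (some i) (some j)
      if idx.contains sub then PySem.Set.union hit2 (idx.getD sub PySem.Set.empty) else hit2) hit)
    PySem.Set.empty

def inferir_aspecto_alt (palabras_tema : List String) (aspectos : List (String × List String)) : String :=
  let idx := pvBuildIdx aspectos
  -- cuenta = {aspecto: 0 for aspecto in aspectos}
  let cnt0 : PySem.Dict String Int :=
    aspectos.foldl (fun d p => d.insert p.1 0) PySem.Dict.empty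
  -- per word: cuenta[a] += 1 for each aspect found via the index
  let cnt : PySem.Dict String Int :=
    palabras_tema.foldl (fun c palabra =>
      (pvHits idx palabra).foldl (fun c2 a => c2.insert a (c2.getD a 0 + 1)) c) cnt0
  -- mejor, puntaje = max(cuenta.items(), key=lambda kv: kv[1])
  match cnt.items.foldl pvMaxStep none with
  | none => ""   -- Python raises ValueError here (empty dict); excluded by Pre_
  | some (a, v) => if v == 0 then "aspecto general no definido" else a

-- ===== PRECONDITION & SPEC =====
-- Pre_ excludes the empty dict, on which Python A raises ValueError (max() of empty sequence);
-- the Nodup conjunct only states the dict representation invariant (an assoc list with duplicate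
-- keys does not encode any Python dict), so it excludes no real Python input.
def Pre_inferir_aspecto (palabras_tema : List String) (aspectos : List (String × List String)) : Prop :=
  aspectos ≠ [] ∧ (aspectos.map Prod.fst).Nodup
instance (palabras_tema : List String) (aspectos : List (String × List String)) : Decidable (Pre_inferir_aspecto palabras_tema aspectos) := by unfold Pre_inferir_aspecto; infer_instance

def pvWitness_inferir_aspecto : List String × (List (String × List String)) :=
  (["buen precio"], [("precio", ["precio", "costo"]), ("calidad", ["bueno"])])

def Spec_inferir_aspecto (palabras_tema : List String) (aspectos : List (String × List String)) (out : String) : Prop := out = inferir_aspecto_alt palabras_tema aspectos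
instance (palabras_tema : List String) (aspectos : List (String × List String)) (out : String) : Decidable (Spec_inferir_aspecto palabras_tema aspectos out) := by unfold Spec_inferir_aspecto; infer_instance

-- ===== CLAIM (what is proved, stated in full; the proofs are below) =====
def Claim_equal_inferir_aspecto : Prop := ∀ (palabras_tema : List String) (aspectos : List (String × List String)), Dom_inferir_aspecto palabras_tema aspectos → Pre_inferir_aspecto palabras_tema aspectos → Spec_inferir_aspecto palabras_tema aspectos (inferir_aspecto palabras_tema aspectos)

-- ===== LEMMAS AND PROOFS =====

-- number of words that match the keyword list (the common score of both programs)
def pvScore (palabras_tema : List String) (keywords : List String) : Int :=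
  (palabras_tema.countP (fun palabra => pvAnyKw keywords palabra) : Nat)

-- ---- A side: the score dict after the double loop (invariant over the two folds) ----

theorem pv_inner (palabra : String) (f : (String × List String) → Int) :
    ∀ (suf pre : List (String × List String)) (sc : PySem.Dict String Int),
    ((pre ++ suf).map Prod.fst).Nodup →
    sc.items = pre.map (fun p => (p.1, f p + (if pvAnyKw p.2 palabra then 1 else 0)))
               ++ suf.map (fun p => (p.1, f p)) →
    (suf.foldl (fun sc2 p =>
        if pvAnyKw p.2 palabra then sc2.insert p.1 (sc2.getD p.1 0 + 1) else sc2) sc).items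
      = (pre ++ suf).map (fun p => (p.1, f p + (if pvAnyKw p.2 palabra then 1 else 0))) := by
  intro suf
  induction suf with
  | nil =>
    intro pre sc _ hit
    simpa using hit
  | cons p suf ih =>
    intro pre sc hnd hit
    have hnd' := hnd
    simp only [List.map_append, List.map_cons, List.nodup_append, List.nodup_cons] at hnd'
    obtain ⟨hpre_nd, ⟨hp_suf, hsuf_nd⟩, hdisj⟩ := hnd'
    have hp_pre : p.1 ∉ pre.map Prod.fst := fun hmem =>
      hdisj _ hmem _ (List.mem_cons_self) rfl
    have hnd2 : (((pre ++ [p]) ++ suf).map Prod.fst).Nodup := by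
      simpa [List.append_assoc] using hnd
    simp only [List.foldl_cons]
    by_cases hm : pvAnyKw p.2 palabra
    · -- matching word: scores[p.1] += 1
      have hmem : (p.1, f p) ∈ sc.items := by
        rw [hit]; exact List.mem_append_right _ (List.mem_cons_self)
      have hkeys : sc.keys.Nodup := by
        have : sc.keys = (pre ++ p :: suf).map Prod.fst := by
          simp only [PySem.Dict.keys, hit, List.map_append, List.map_cons, List.map_map]
          rfl
        rw [this]; exact hnd
      have hget : sc.get? p.1 = some (f p) := PySem.Dict.get?_of_mem_items sc hmem hkeys
      have hgetD : sc.getD p.1 0 = f p := by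
        rw [PySem.Dict.getD_eq_get?_getD, hget]; rfl
      have hcont : sc.contains p.1 = true := by
        rw [PySem.Dict.contains_eq_isSome_get?, hget]; rfl
      have hins : (sc.insert p.1 (sc.getD p.1 0 + 1)).items
          = (pre ++ [p]).map (fun q => (q.1, f q + (if pvAnyKw q.2 palabra then 1 else 0)))
            ++ suf.map (fun q => (q.1, f q)) := by
        rw [PySem.Dict.items_insert_of_contains _ _ hcont, hgetD, hit]
        simp only [List.map_append, List.map_cons, List.map_map, List.map_nil,
          List.append_assoc, List.cons_append, List.nil_append]
        congr 1
        · apply List.map_congr_left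
          intro q hq
          have hne : q.1 ≠ p.1 := fun h => hp_pre (h ▸ List.mem_map_of_mem hq)
          simp [Function.comp, hne]
        · congr 1
          · simp [hm]
          · apply List.map_congr_left
            intro q hq
            have hne : q.1 ≠ p.1 := fun h => hp_suf (h ▸ List.mem_map_of_mem hq)
            simp [Function.comp, hne]
      rw [if_pos hm]
      have := ih (pre ++ [p]) (sc.insert p.1 (sc.getD p.1 0 + 1)) hnd2 hins
      simpa [List.append_assoc] using this
    · -- non-matching word: dict unchanged
      rw [if_neg hm]
      have hit2 : sc.items
          = (pre ++ [p]).map (fun q => (q.1, f q + (if pvAnyKw q.2 palabra then 1 else 0)))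
            ++ suf.map (fun q => (q.1, f q)) := by
        rw [hit]; simp [hm]
      have := ih (pre ++ [p]) sc hnd2 hit2
      simpa [List.append_assoc] using this

theorem pv_outer (aspectos : List (String × List String))
    (hnd : (aspectos.map Prod.fst).Nodup) :
    ∀ (ws : List String) (c : (String × List String) → Int) (sc : PySem.Dict String Int),
    sc.items = aspectos.map (fun p => (p.1, c p)) →
    (ws.foldl (fun sc palabra =>
        aspectos.foldl (fun sc2 p =>
          if pvAnyKw p.2 palabra then sc2.insert p.1 (sc2.getD p.1 0 + 1) else sc2) sc) sc).items
      = aspectos.map (fun p => (p.1, c p + pvScore ws p.2)) := by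
  intro ws
  induction ws with
  | nil =>
    intro c sc hit
    simpa [pvScore] using hit
  | cons w ws ih =>
    intro c sc hit
    simp only [List.foldl_cons]
    have hinner := pv_inner w c aspectos [] sc (by simpa using hnd) (by simpa using hit)
    have := ih (fun p => c p + (if pvAnyKw p.2 w then 1 else 0)) _ (by simpa using hinner)
    rw [this]
    apply List.map_congr_left
    intro p _
    have hc : (List.countP (fun palabra => pvAnyKw p.2 palabra) (w :: ws) : Int)
        = (if pvAnyKw p.2 w then 1 else 0) + (List.countP (fun palabra => pvAnyKw p.2 palabra) ws : Int) := by
      rw [List.countP_cons]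
      split <;> push_cast <;> omega
    simp only [pvScore, hc, Prod.mk.injEq]
    exact ⟨trivial, by ring⟩

-- ---- B side: what the keyword index contains ----

theorem pv_idx_inner (nm : String) :
    ∀ (ks : List String) (d : PySem.Dict String (PySem.Set String)) (k a : String),
    (a ∈ (ks.foldl (fun d2 k2 => d2.insert k2 (PySem.Set.add (d2.getD k2 PySem.Set.empty) nm)) d).getD k PySem.Set.empty)
      ↔ a ∈ d.getD k PySem.Set.empty ∨ (k ∈ ks ∧ a = nm) := by
  intro ks
  induction ks with
  | nil => intro d k a; simp
  | cons k0 ks ih =>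
    intro d k a
    simp only [List.foldl_cons]
    rw [ih]
    rw [PySem.Dict.getD_insert]
    by_cases hk : k = k0
    · subst hk
      simp [PySem.Set.mem_add]
      tauto
    · simp [hk]

theorem pv_idx_mem :
    ∀ (l : List (String × List String)) (d : PySem.Dict String (PySem.Set String)) (k a : String),
    (a ∈ (l.foldl (fun d p =>
        p.2.foldl (fun d2 k2 => d2.insert k2 (PySem.Set.add (d2.getD k2 PySem.Set.empty) p.1)) d) d).getD k PySem.Set.empty)
      ↔ a ∈ d.getD k PySem.Set.empty ∨ ∃ p ∈ l, a = p.1 ∧ k ∈ p.2 := by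
  intro l
  induction l with
  | nil => intro d k a; simp
  | cons p l ih =>
    intro d k a
    simp only [List.foldl_cons]
    rw [ih, pv_idx_inner]
    simp only [List.mem_cons]
    constructor
    · rintro (⟨h | ⟨hk, ha⟩⟩ | ⟨q, hq, ha, hk⟩)
      · exact Or.inl h
      · exact Or.inr ⟨p, Or.inl rfl, ha, hk⟩
      · exact Or.inr ⟨q, Or.inr hq, ha, hk⟩
    · rintro (h | ⟨q, (rfl | hq), ha, hk⟩)
      · exact Or.inl (Or.inl h)
      · exact Or.inl (Or.inr ⟨hk, ha⟩)
      · exact Or.inr ⟨q, hq, ha, hk⟩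

theorem pv_build_mem (aspectos : List (String × List String)) (k a : String) :
    a ∈ (pvBuildIdx aspectos).getD k PySem.Set.empty ↔ ∃ p ∈ aspectos, a = p.1 ∧ k ∈ p.2 := by
  unfold pvBuildIdx
  rw [pv_idx_mem]
  simp [PySem.Dict.getD_empty]

-- ---- B side: membership in the substring-probe set ----

theorem pv_mem_probe (idx : PySem.Dict String (PySem.Set String)) (w : String) (i : Int) (a : String) :
    ∀ (l : List Int) (h0 : PySem.Set String),
    (a ∈ l.foldl (fun hit2 j =>
        if idx.contains (PySem.Str.slice w (some i) (some j))
        then PySem.Set.union hit2 (idx.getD (PySem.Str.slice w (some i) (some j)) PySem.Set.empty)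
        else hit2) h0)
      ↔ a ∈ h0 ∨ ∃ j ∈ l, a ∈ idx.getD (PySem.Str.slice w (some i) (some j)) PySem.Set.empty := by
  intro l
  induction l with
  | nil => intro h0; simp
  | cons j l ih =>
    intro h0
    simp only [List.foldl_cons]
    rw [ih]
    by_cases hc : idx.contains (PySem.Str.slice w (some i) (some j)) = true
    · rw [if_pos hc]
      rw [PySem.Set.mem_union]
      simp only [List.mem_cons]
      constructor
      · rintro ((h | ha) | ⟨j', hj', ha⟩)
        · exact Or.inl h
        · exact Or.inr ⟨j, Or.inl rfl, ha⟩
        · exact Or.inr ⟨j', Or.inr hj', ha⟩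
      · rintro (h | ⟨j', (rfl | hj'), ha⟩)
        · exact Or.inl (Or.inl h)
        · exact Or.inl (Or.inr ha)
        · exact Or.inr ⟨j', hj', ha⟩
    · rw [if_neg hc]
      have hz : idx.getD (PySem.Str.slice w (some i) (some j)) PySem.Set.empty = PySem.Set.empty :=
        PySem.Dict.getD_of_not_contains idx _ (by simpa using hc)
      simp only [List.mem_cons]
      constructor
      · rintro (h | ⟨j', hj', ha⟩)
        · exact Or.inl h
        · exact Or.inr ⟨j', Or.inr hj', ha⟩
      · rintro (h | ⟨j', (rfl | hj'), ha⟩)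
        · exact Or.inl h
        · rw [hz] at ha; cases ha
        · exact Or.inr ⟨j', hj', ha⟩

theorem pv_mem_hits (idx : PySem.Dict String (PySem.Set String)) (w : String) (a : String) :
    a ∈ pvHits idx w ↔
      ∃ i ∈ PySem.List.pyRange 0 (PySem.Str.len w + 1),
      ∃ j ∈ PySem.List.pyRange i (PySem.Str.len w + 1),
        a ∈ idx.getD (PySem.Str.slice w (some i) (some j)) PySem.Set.empty := by
  unfold pvHits
  have main : ∀ (l : List Int) (h0 : PySem.Set String),
      (a ∈ l.foldl (fun hit i =>
          (PySem.List.pyRange i (PySem.Str.len w + 1)).foldl (fun hit2 j =>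
            if idx.contains (PySem.Str.slice w (some i) (some j))
            then PySem.Set.union hit2 (idx.getD (PySem.Str.slice w (some i) (some j)) PySem.Set.empty)
            else hit2) hit) h0)
        ↔ a ∈ h0 ∨ ∃ i ∈ l, ∃ j ∈ PySem.List.pyRange i (PySem.Str.len w + 1),
            a ∈ idx.getD (PySem.Str.slice w (some i) (some j)) PySem.Set.empty := by
    intro l
    induction l with
    | nil => intro h0; simp
    | cons i l ih =>
      intro h0
      simp only [List.foldl_cons]
      rw [ih, pv_mem_probe]
      simp only [List.mem_cons]
      constructor
      · rintro (⟨h | ⟨j, hj, ha⟩⟩ | ⟨i', hi', hrest⟩)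
        · exact Or.inl h
        · exact Or.inr ⟨i, Or.inl rfl, j, hj, ha⟩
        · exact Or.inr ⟨i', Or.inr hi', hrest⟩
      · rintro (h | ⟨i', (rfl | hi'), hrest⟩)
        · exact Or.inl (Or.inl h)
        · exact Or.inl (Or.inr hrest)
        · exact Or.inr ⟨i', hi', hrest⟩
  rw [main]
  simp [PySem.Set.empty]

theorem pv_nodup_hits (idx : PySem.Dict String (PySem.Set String)) (w : String) :
    (pvHits idx w).Nodup := by
  unfold pvHits
  have inner : ∀ (l : List Int) (i : Int) (h0 : PySem.Set String), h0.Nodup →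
      (l.foldl (fun hit2 j =>
        if idx.contains (PySem.Str.slice w (some i) (some j))
        then PySem.Set.union hit2 (idx.getD (PySem.Str.slice w (some i) (some j)) PySem.Set.empty)
        else hit2) h0).Nodup := by
    intro l
    induction l with
    | nil => intro i h0 h; exact h
    | cons j l ih =>
      intro i h0 h
      simp only [List.foldl_cons]
      apply ih
      split
      · exact PySem.Set.nodup_union _ _ h
      · exact h
  have outer : ∀ (l : List Int) (h0 : PySem.Set String), h0.Nodup →
      (l.foldl (fun hit i =>
        (PySem.List.pyRange i (PySem.Str.len w + 1)).foldl (fun hit2 j =>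
          if idx.contains (PySem.Str.slice w (some i) (some j))
          then PySem.Set.union hit2 (idx.getD (PySem.Str.slice w (some i) (some j)) PySem.Set.empty)
          else hit2) hit) h0).Nodup := by
    intro l
    induction l with
    | nil => intro h0 h; exact h
    | cons i l ih =>
      intro h0 h
      simp only [List.foldl_cons]
      exact ih _ (inner _ i h0 h)
  exact outer _ _ (by simp [PySem.Set.empty])

-- ---- B side: substring probing finds exactly the infix keywords ----

theorem pv_hits_iff_infix (idx : PySem.Dict String (PySem.Set String)) (w : String) (a : String) :
    a ∈ pvHits idx w ↔
      ∃ sub : String, sub.toList <:+: w.toList ∧ a ∈ idx.getD sub PySem.Set.empty := by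
  rw [pv_mem_hits]
  constructor
  · rintro ⟨i, hi, j, hj, ha⟩
    rw [PySem.List.mem_pyRange_one] at hi hj
    refine ⟨PySem.Str.slice w (some i) (some j), ?_, ha⟩
    have h0i : 0 ≤ i := hi.1
    have h0j : 0 ≤ j := le_trans h0i hj.1
    have : (PySem.Str.slice w (some i) (some j)).toList
        = List.take (j.toNat - i.toNat) (List.drop i.toNat w.toList) := by
      rw [PySem.Str.toList_slice, PySem.Chars.slice_eq_listSlice,
        PySem.List.slice_toNat _ h0i h0j]
    rw [this]
    exact ((List.take_prefix _ _).isInfix).trans ((List.drop_suffix _ _).isInfix)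
  · rintro ⟨sub, hinf, ha⟩
    obtain ⟨s, t, hst⟩ := hinf
    have hlen : s.length + sub.toList.length + t.length = w.toList.length := by
      have h := congrArg List.length hst
      rw [List.length_append, List.length_append] at h
      exact h
    have hn : PySem.Str.len w = (w.toList.length : Int) := PySem.Str.len_eq w
    refine ⟨(s.length : Int), ?_, ((s.length + sub.toList.length : Nat) : Int), ?_, ?_⟩
    · rw [PySem.List.mem_pyRange_one, hn]
      constructor
      · exact_mod_cast Nat.zero_le _
      · omega
    · rw [PySem.List.mem_pyRange_one, hn]
      constructor
      · push_cast; omega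
      · push_cast; omega
    · have hsl : PySem.Str.slice w (some (s.length : Int)) (some ((s.length + sub.toList.length : Nat) : Int)) = sub := by
        rw [← String.toList_inj]
        rw [PySem.Str.toList_slice, PySem.Chars.slice_eq_listSlice,
          PySem.List.slice_toNat _ (by exact_mod_cast Nat.zero_le _) (by exact_mod_cast Nat.zero_le _)]
        simp only [Int.toNat_natCast]
        rw [Nat.add_sub_cancel_left]
        rw [← hst, List.append_assoc, List.drop_left, List.take_left]
      rw [hsl]
      exact ha

-- ---- B side: the per-aspect indicator ----

theorem pv_hits_iff_any (aspectos : List (String × List String))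
    (hnd : (aspectos.map Prod.fst).Nodup) (w : String)
    (p : String × List String) (hp : p ∈ aspectos) :
    (p.1 ∈ pvHits (pvBuildIdx aspectos) w) ↔ pvAnyKw p.2 w = true := by
  rw [pv_hits_iff_infix]
  unfold pvAnyKw
  rw [List.any_eq_true]
  constructor
  · rintro ⟨sub, hinf, ha⟩
    obtain ⟨q, hq, he, hk⟩ := (pv_build_mem aspectos sub p.1).mp ha
    have hqp : q = p := List.inj_on_of_nodup_map hnd hq hp he.symm
    subst hqp
    exact ⟨sub, hk, (PySem.Str.isIn_iff_infix sub w).mpr hinf⟩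
  · rintro ⟨k, hk, hin⟩
    exact ⟨k, (PySem.Str.isIn_iff_infix k w).mp hin,
      (pv_build_mem aspectos k p.1).mpr ⟨p, hp, rfl, hk⟩⟩

theorem pv_hits_sub (aspectos : List (String × List String)) (w : String) (a : String)
    (h : a ∈ pvHits (pvBuildIdx aspectos) w) : a ∈ aspectos.map Prod.fst := by
  rw [pv_hits_iff_infix] at h
  obtain ⟨sub, _, ha⟩ := h
  obtain ⟨p, hp, rfl, _⟩ := (pv_build_mem aspectos sub a).mp ha
  exact List.mem_map_of_mem hp

-- ---- B side: the counter dict ----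

theorem pv_count_nodup {l : List String} (h : l.Nodup) (a : String) :
    (l.count a : Int) = if a ∈ l then 1 else 0 := by
  by_cases hm : a ∈ l
  · have h1 : l.count a ≤ 1 := List.nodup_iff_count_le_one.mp h a
    have h2 : 0 < l.count a := List.count_pos_iff.mpr hm
    rw [if_pos hm]
    omega
  · rw [if_neg hm, List.count_eq_zero.mpr hm]
    rfl

theorem pv_items_eq (d : PySem.Dict String Int) (h : d.keys.Nodup) :
    d.items = d.keys.map (fun k => (k, d.getD k 0)) := by
  simp only [PySem.Dict.keys, List.map_map]
  conv_lhs => rw [← List.map_id d.items]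
  apply List.map_congr_left
  intro q hq
  obtain ⟨k, v⟩ := q
  simp [Function.comp, PySem.Dict.getD_of_mem_items d hq h]

theorem pv_foldl_add_id : ∀ (hs : List String) (s : PySem.Set String),
    (∀ x ∈ hs, x ∈ s) → hs.foldl PySem.Set.add s = s := by
  intro hs
  induction hs with
  | nil => intro s _; rfl
  | cons a hs ih =>
    intro s h
    simp only [List.foldl_cons]
    rw [PySem.Set.add_of_mem (h a List.mem_cons_self)]
    exact ih s (fun x hx => h x (List.mem_cons_of_mem _ hx))

theorem pv_bump (aspectos : List (String × List String))
    (hnd : (aspectos.map Prod.fst).Nodup) (hs : List String) (hnodup : hs.Nodup)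
    (hsub : ∀ x ∈ hs, x ∈ aspectos.map Prod.fst)
    (c : (String × List String) → Int) (d : PySem.Dict String Int)
    (hd : d.items = aspectos.map (fun p => (p.1, c p))) :
    (hs.foldl (fun c2 a => c2.insert a (c2.getD a 0 + 1)) d).items
      = aspectos.map (fun p => (p.1, c p + if p.1 ∈ hs then 1 else 0)) := by
  have hkeys : d.keys = aspectos.map Prod.fst := by
    simp only [PySem.Dict.keys, hd, List.map_map]
    rfl
  have hkn : d.keys.Nodup := by rw [hkeys]; exact hnd
  have hk' : (hs.foldl (fun c2 a => c2.insert a (c2.getD a 0 + 1)) d).keys = d.keys := by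
    rw [PySem.Dict.keys_foldl_insert]
    exact pv_foldl_add_id hs d.keys (by rw [hkeys]; exact hsub)
  have hkn' : (hs.foldl (fun c2 a => c2.insert a (c2.getD a 0 + 1)) d).keys.Nodup := by
    rw [hk']; exact hkn
  rw [pv_items_eq _ hkn', hk', hkeys, List.map_map]
  apply List.map_congr_left
  intro p hp
  have hmem : (p.1, c p) ∈ d.items := by
    rw [hd]; exact List.mem_map_of_mem hp
  have hdp : d.getD p.1 0 = c p := PySem.Dict.getD_of_mem_items d hmem hkn 0
  have hg := PySem.Dict.getD_foldl_insert_add_one hs d p.1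
  simp only [Function.comp]
  rw [hg, hdp, pv_count_nodup hnodup]

theorem pv_b_outer (aspectos : List (String × List String))
    (hnd : (aspectos.map Prod.fst).Nodup) :
    ∀ (ws : List String) (c : (String × List String) → Int) (d : PySem.Dict String Int),
    d.items = aspectos.map (fun p => (p.1, c p)) →
    (ws.foldl (fun c2 palabra =>
        (pvHits (pvBuildIdx aspectos) palabra).foldl (fun c3 a => c3.insert a (c3.getD a 0 + 1)) c2) d).items
      = aspectos.map (fun p => (p.1, c p + pvScore ws p.2)) := by
  intro ws
  induction ws with
  | nil =>
    intro c d hd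
    simpa [pvScore] using hd
  | cons w ws ih =>
    intro c d hd
    simp only [List.foldl_cons]
    have hstep := pv_bump aspectos hnd (pvHits (pvBuildIdx aspectos) w)
      (pv_nodup_hits _ w) (fun x hx => pv_hits_sub aspectos w x hx) c d hd
    have hstep' : ((pvHits (pvBuildIdx aspectos) w).foldl (fun c3 a => c3.insert a (c3.getD a 0 + 1)) d).items
        = aspectos.map (fun p => (p.1, c p + (if pvAnyKw p.2 w then 1 else 0))) := by
      rw [hstep]
      apply List.map_congr_left
      intro p hp
      have := pv_hits_iff_any aspectos hnd w p hp
      by_cases hb : pvAnyKw p.2 w = true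
      · simp [hb, this.mpr hb]
      · have : p.1 ∉ pvHits (pvBuildIdx aspectos) w := fun hm => hb (this.mp hm)
        simp [hb, this]
    have := ih (fun p => c p + (if pvAnyKw p.2 w then 1 else 0)) _ hstep'
    rw [this]
    apply List.map_congr_left
    intro p _
    have hc : (List.countP (fun palabra => pvAnyKw p.2 palabra) (w :: ws) : Int)
        = (if pvAnyKw p.2 w then 1 else 0) + (List.countP (fun palabra => pvAnyKw p.2 palabra) ws : Int) := by
      rw [List.countP_cons]
      split <;> push_cast <;> omega
    simp only [pvScore, hc, Prod.mk.injEq]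
    exact ⟨trivial, by ring⟩

-- ===== VERDICT (by name: the statement is the Claim_ definition above) =====
theorem inferir_aspecto_spec : Claim_equal_inferir_aspecto := by
  intro pal asp _ hPre
  obtain ⟨hne, hnd⟩ := hPre
  unfold Spec_inferir_aspecto
  have h0 : (asp.foldl (fun d p => d.insert p.1 0) (PySem.Dict.empty : PySem.Dict String Int)).items
      = asp.map (fun p => (p.1, (0 : Int))) := by
    have := PySem.Dict.items_foldl_insert_fresh asp Prod.fst (fun _ => (0 : Int))
      PySem.Dict.empty (fun a _ => PySem.Dict.contains_empty a.1) hnd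
    simpa [PySem.Dict.empty] using this
  have hA := pv_outer asp hnd pal (fun _ => (0 : Int)) _ h0
  have hB := pv_b_outer asp hnd pal (fun _ => (0 : Int)) _ h0
  have hA' : (pal.foldl (fun sc palabra =>
        asp.foldl (fun sc2 p =>
          if pvAnyKw p.2 palabra then sc2.insert p.1 (sc2.getD p.1 0 + 1) else sc2) sc)
        (asp.foldl (fun d p => d.insert p.1 0) PySem.Dict.empty)).items
      = asp.map (fun p => (p.1, pvScore pal p.2)) := by
    rw [hA]; apply List.map_congr_left; intro p _; simp
  have hB' : (pal.foldl (fun c palabra =>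
        (pvHits (pvBuildIdx asp) palabra).foldl (fun c2 a => c2.insert a (c2.getD a 0 + 1)) c)
        (asp.foldl (fun d p => d.insert p.1 0) PySem.Dict.empty)).items
      = asp.map (fun p => (p.1, pvScore pal p.2)) := by
    rw [hB]; apply List.map_congr_left; intro p _; simp
  simp only [inferir_aspecto, inferir_aspecto_alt]
  rw [hA', hB']
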